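-- pv_equiv track=rewrite | github.com/RobertTzc/Retinanet_inference_example | retinanet_inference_ver2.py | get_model_extension
-- ===== SOURCE A (Python) =====
-- model_extension = {'Bird_drone_KNN':{20:('_alt_15',15),
--                         40:('_alt_30',30),
--                         75:('_alt_60',60),
--                         90:('_alt_90',90)}
--                     }
--
-- def get_model_extension(model_type,model_dir,altitude):
--     if(model_type in model_extension):
--         model_ext = model_extension[model_type]
--         for altitude_thresh in model_ext:
--             if (altitude_thresh>=altitude):
--                 ref_altitude = model_ext[altitude_thresh][1]
--                 model_dir = model_dir.replace('.pkl',model_ext[altitude_thresh][0]+'.pkl')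
--                 return model_dir,ref_altitude
--         model_dir = model_dir.replace('.pkl',model_ext[max(model_ext.keys())][0]+'.pkl')
--         return model_dir,model_ext[max(model_ext.keys())][1]
--     else:
--         return model_dir,altitude
-- ===== SOURCE B (Python) =====
-- model_extension = {'Bird_drone_KNN':{20:('_alt_15',15),
--                         40:('_alt_30',30),
--                         75:('_alt_60',60),
--                         90:('_alt_90',90)}
--                     }
--
-- def get_model_extension(model_type, model_dir, altitude):
--     if model_type not in model_extension:
--         return model_dir, altitude
--     model_ext = model_extension[model_type]
--     cands = [t for t in model_ext if t >= altitude]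
--     key = min(cands) if cands else max(model_ext)
--     ext, ref = model_ext[key]
--     return model_dir.replace('.pkl', ext + '.pkl'), ref
-- ===== Notes on version B (the rewrite author's own statement) =====
-- stated objective: simpler
-- what changed: A scans the threshold dict in insertion order with an early return and relies on that order being ascending; B selects the threshold explicitly as min of the thresholds >= altitude (else max of all thresholds), then does the single filename replace and return.
import Mathlib
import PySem

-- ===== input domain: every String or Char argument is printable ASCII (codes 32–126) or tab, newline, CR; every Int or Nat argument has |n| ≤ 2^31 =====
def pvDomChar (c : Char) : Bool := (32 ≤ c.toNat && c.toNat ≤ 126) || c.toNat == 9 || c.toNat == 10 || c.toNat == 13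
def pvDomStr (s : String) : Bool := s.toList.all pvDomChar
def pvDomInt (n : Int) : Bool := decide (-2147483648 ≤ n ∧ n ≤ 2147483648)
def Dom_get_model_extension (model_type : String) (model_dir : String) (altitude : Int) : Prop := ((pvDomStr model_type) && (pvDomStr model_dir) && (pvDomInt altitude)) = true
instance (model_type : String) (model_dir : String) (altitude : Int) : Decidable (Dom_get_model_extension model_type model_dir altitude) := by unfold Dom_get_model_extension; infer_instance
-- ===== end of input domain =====

-- ===== PORT A =====
-- B rewrite: selects the threshold explicitly (min of the thresholds ≥ altitude, else max) instead of
-- A's order-dependent early-return scan over dict insertion order; objective: simpler.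
-- the module constant model_extension: a dict String -> dict Int -> (String × Int)
def modelExtensionTbl : PySem.Dict Int (String × Int) :=
  PySem.Dict.mk [(20, ("_alt_15", 15)), (40, ("_alt_30", 30)), (75, ("_alt_60", 60)), (90, ("_alt_90", 90))]

def modelExtension : PySem.Dict String (PySem.Dict Int (String × Int)) :=
  PySem.Dict.mk [("Bird_drone_KNN", modelExtensionTbl)]

-- the early-return for-loop of A: iterate the dict keys in insertion order, return on first hit
def pvLoopA (model_ext : PySem.Dict Int (String × Int)) (model_dir : String) (altitude : Int) :
    List Int → Option (String × Int)
  | [] => none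
  | altitude_thresh :: rest =>
    if altitude ≤ altitude_thresh then
      let v := (PySem.Dict.get? model_ext altitude_thresh).getD ("", 0)
      some (PySem.Str.replace model_dir ".pkl" (v.1 ++ ".pkl"), v.2)
    else pvLoopA model_ext model_dir altitude rest

def get_model_extension (model_type : String) (model_dir : String) (altitude : Int) : String × Int :=
  match PySem.Dict.get? modelExtension model_type with
  | some model_ext =>
    match pvLoopA model_ext model_dir altitude (PySem.Dict.keys model_ext) with
    | some r => r
    | none =>
      let mk := (PySem.List.max? (PySem.Dict.keys model_ext) (fun x => x)).getD 0
      let v := (PySem.Dict.get? model_ext mk).getD ("", 0)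
      (PySem.Str.replace model_dir ".pkl" (v.1 ++ ".pkl"), v.2)
  | none => (model_dir, altitude)

-- ===== PORT B =====
def get_model_extension_alt (model_type : String) (model_dir : String) (altitude : Int) : String × Int :=
  match PySem.Dict.get? modelExtension model_type with
  | none => (model_dir, altitude)
  | some model_ext =>
    let cands := (PySem.Dict.keys model_ext).filter (fun t => altitude ≤ t)
    let key := match PySem.List.min? cands (fun x => x) with
      | some m => m
      | none => (PySem.List.max? (PySem.Dict.keys model_ext) (fun x => x)).getD 0
    let v := (PySem.Dict.get? model_ext key).getD ("", 0)
    (PySem.Str.replace model_dir ".pkl" (v.1 ++ ".pkl"), v.2)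

-- ===== PRECONDITION & SPEC =====
def Spec_get_model_extension (model_type : String) (model_dir : String) (altitude : Int) (out : String × Int) : Prop := out = get_model_extension_alt model_type model_dir altitude
instance (model_type : String) (model_dir : String) (altitude : Int) (out : String × Int) : Decidable (Spec_get_model_extension model_type model_dir altitude out) := by unfold Spec_get_model_extension; infer_instance

-- ===== CLAIM (what is proved, stated in full; the proofs are below) =====
def Claim_equal_get_model_extension : Prop := ∀ (model_type : String) (model_dir : String) (altitude : Int), Dom_get_model_extension model_type model_dir altitude → Spec_get_model_extension model_type model_dir altitude (get_model_extension model_type model_dir altitude)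

-- ===== LEMMAS AND PROOFS =====

-- ===== VERDICT (by name: the statement is the Claim_ definition above) =====
theorem get_model_extension_spec : Claim_equal_get_model_extension := by
  intro model_type model_dir altitude _
  unfold Spec_get_model_extension get_model_extension get_model_extension_alt
  by_cases h : "Bird_drone_KNN" = model_type
  · subst h
    by_cases h1 : altitude ≤ 20
    · simp [modelExtension, modelExtensionTbl, PySem.Dict.keys, pvLoopA,
        PySem.List.min?, PySem.Dict.get?,
        h1, show altitude ≤ 40 by omega, show altitude ≤ 75 by omega, show altitude ≤ 90 by omega]
    · by_cases h2 : altitude ≤ 40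
      · simp [modelExtension, modelExtensionTbl, PySem.Dict.keys, pvLoopA,
          PySem.List.min?, PySem.Dict.get?,
          h1, h2, show altitude ≤ 75 by omega, show altitude ≤ 90 by omega]
      · by_cases h3 : altitude ≤ 75
        · simp [modelExtension, modelExtensionTbl, PySem.Dict.keys, pvLoopA,
            PySem.List.min?, PySem.Dict.get?,
            h1, h2, h3, show altitude ≤ 90 by omega]
        · by_cases h4 : altitude ≤ 90
          · simp [modelExtension, modelExtensionTbl, PySem.Dict.keys, pvLoopA,
              PySem.List.min?, PySem.Dict.get?,
              h1, h2, h3, h4]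
          · simp [modelExtension, modelExtensionTbl, PySem.Dict.keys, pvLoopA,
              PySem.List.min?, PySem.List.max?, PySem.Dict.get?,
              h1, h2, h3, h4]
  · simp [PySem.Dict.get?, modelExtension, h]
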